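-- pv_equiv track=rewrite | github.com/KavanBitontree/fastapi-post-discharge-system-backend | icd_rag_bot/rag/selector.py | _drop_ancestors_and_unspecified
-- ===== SOURCE A (Python) =====
-- from typing import Any, Dict, List, Optional, Set, Tuple
--
-- def _is_unspecified_title(title: str) -> bool:
--     t = (title or "").lower()
--     return "unspecified" in t or "unspec" in t
--
-- def _drop_ancestors_and_unspecified(selected: List[Dict[str, str]]) -> List[Dict[str, str]]:
--     """
--     Your existing cleanup logic :contentReference[oaicite:5]{index=5}, kept and tightened.
--     """
--     if not selected:
--         return selected
--
--     codes = [s.get("code", "").strip() for s in selected if s.get("code")]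
--     titles = {s.get("code", "").strip(): (s.get("title", "") or "") for s in selected}
--
--     def category(c: str) -> str:
--         return c.split(".")[0].strip()
--
--     drop = set()
--
--     # Drop ancestor codes by prefix relationship
--     for c in codes:
--         for o in codes:
--             if c == o:
--                 continue
--             if o.startswith(c) and len(o) > len(c):
--                 drop.add(c)
--
--     # Drop unspecified when a more specific in same category exists
--     for c in codes:
--         if _is_unspecified_title(titles.get(c, "")):
--             cat = category(c)
--             if any(
--                 (o != c) and (category(o) == cat) and (not _is_unspecified_title(titles.get(o, "")))
--                 for o in codes
--             ):
--                 drop.add(c)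
--
--     return [s for s in selected if (s.get("code", "").strip() not in drop)]
-- ===== SOURCE B (Python) =====
-- def _is_unspec(title):
--     return "unspec" in title.lower()
--
-- def _category(c):
--     return c.split(".")[0].strip()
--
-- def _drop_ancestors_and_unspecified(selected):
--     titles = {}
--     codes = {}  # insertion-ordered set of stripped codes (dict keys)
--     for s in selected:
--         code = s.get("code", "").strip()
--         titles[code] = s.get("title", "")
--         if s.get("code"):
--             codes[code] = True
--     drop = set()
--     # a code is an ancestor iff it is a proper prefix of some selected code:
--     # enumerate each code's proper prefixes once and test set membership
--     for o in codes:
--         for i in range(len(o)):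
--             p = o[:i]
--             if p in codes:
--                 drop.add(p)
--     good_cats = {_category(c) for c in codes if not _is_unspec(titles[c])}
--     for c in codes:
--         if _is_unspec(titles[c]) and _category(c) in good_cats:
--             drop.add(c)
--     return [s for s in selected if s.get("code", "").strip() not in drop]
-- ===== Notes on version B (the rewrite author's own statement) =====
-- stated objective: alternative
-- what changed: B replaces A's all-pairs prefix scan by enumerating each code's proper prefixes once against a hash set of codes, and replaces A's per-code inner scan for the 'unspecified' rule by a precomputed set of categories that contain a non-unspecified code.
import Mathlib
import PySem

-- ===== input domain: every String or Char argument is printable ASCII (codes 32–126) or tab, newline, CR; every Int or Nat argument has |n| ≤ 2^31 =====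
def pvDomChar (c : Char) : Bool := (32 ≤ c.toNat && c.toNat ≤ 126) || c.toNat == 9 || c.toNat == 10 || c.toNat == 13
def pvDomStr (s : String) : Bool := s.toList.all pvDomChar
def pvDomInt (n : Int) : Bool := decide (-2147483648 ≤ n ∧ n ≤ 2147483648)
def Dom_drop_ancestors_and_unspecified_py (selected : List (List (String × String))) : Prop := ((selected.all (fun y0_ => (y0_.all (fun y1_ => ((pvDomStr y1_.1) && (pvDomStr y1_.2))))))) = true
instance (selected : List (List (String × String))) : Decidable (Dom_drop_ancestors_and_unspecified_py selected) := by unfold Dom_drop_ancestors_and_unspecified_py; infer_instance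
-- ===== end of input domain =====

-- B replaces A's all-pairs scans: it enumerates each code's proper prefixes once against a set of
-- codes, and precomputes the set of categories containing a non-unspecified code (alternative).

-- shared helpers (both Pythons compute these identically)
def pvGetD (s : List (String × String)) (k d : String) : String :=
  PySem.Dict.getD (⟨s⟩ : PySem.Dict String String) k d

-- truthiness of s.get("code"): present and non-empty
def pvTruthyCode (s : List (String × String)) : Bool :=
  match PySem.Dict.get? (⟨s⟩ : PySem.Dict String String) "code" with
  | some t => t != ""
  | none => false

-- s.get("code", "").strip()
def pvCode (s : List (String × String)) : String := PySem.Str.strip (pvGetD s "code" "")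

-- {s.get("code","").strip(): (s.get("title","") or "") for s in selected}  ('x or ""' is the identity on str)
def pvTitles (selected : List (List (String × String))) : PySem.Dict String String :=
  selected.foldl (fun d s => d.insert (pvCode s) (pvGetD s "title" "")) PySem.Dict.empty

-- category(c) = c.split(".")[0].strip()   (split(".") is never empty, so [0] never raises)
def pvCategory (c : String) : String :=
  PySem.Str.strip ((((PySem.Str.split? c ".").getD []).headD ""))

-- ===== PORT A =====
-- _is_unspecified_title: t = title.lower(); "unspecified" in t or "unspec" in t
def pvUnspecA (title : String) : Bool :=
  PySem.Str.isIn "unspecified" (PySem.Str.lower title) || PySem.Str.isIn "unspec" (PySem.Str.lower title)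

-- codes = [s.get("code","").strip() for s in selected if s.get("code")]
def pvCodesA (selected : List (List (String × String))) : List String :=
  (selected.filter pvTruthyCode).map pvCode

-- drop ancestor codes by prefix relationship (nested loop over codes)
def pvDropA1 (selected : List (List (String × String))) : PySem.Set String :=
  (pvCodesA selected).foldl (fun d c => (pvCodesA selected).foldl (fun d o =>
      if o = c then d
      else if PySem.Str.startswith o c && decide (PySem.Str.len c < PySem.Str.len o) then
        PySem.Set.add d c
      else d) d) PySem.Set.empty

-- drop unspecified when a more specific in same category exists
def pvDropA (selected : List (List (String × String))) : PySem.Set String :=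
  (pvCodesA selected).foldl (fun d c =>
      if pvUnspecA ((pvTitles selected).getD c "") then
        (if (pvCodesA selected).any (fun o => o != c && (pvCategory o == pvCategory c) &&
            !pvUnspecA ((pvTitles selected).getD o "")) then PySem.Set.add d c else d)
      else d) (pvDropA1 selected)

def drop_ancestors_and_unspecified_py (selected : List (List (String × String))) : List (List (String × String)) :=
  if selected = [] then selected
  else selected.filter (fun s => !(PySem.Set.contains (pvDropA selected) (pvCode s)))

-- ===== PORT B =====
-- _is_unspec: "unspec" in title.lower()
def pvUnspecB (title : String) : Bool := PySem.Str.isIn "unspec" (PySem.Str.lower title)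

-- one pass building (titles, ordered set of codes)
def pvTC (selected : List (List (String × String))) : PySem.Dict String String × PySem.Set String :=
  selected.foldl
    (fun (tc : PySem.Dict String String × PySem.Set String) s =>
      (tc.1.insert (pvCode s) (pvGetD s "title" ""),
       if pvTruthyCode s then PySem.Set.add tc.2 (pvCode s) else tc.2))
    (PySem.Dict.empty, PySem.Set.empty)

-- each code's proper prefixes o[:i], i in range(len(o)), tested against the code set
def pvDropB1 (selected : List (List (String × String))) : PySem.Set String :=
  ((pvTC selected).2).foldl (fun d o =>
      (PySem.List.pyRange 0 (PySem.Str.len o) 1).foldl (fun d i =>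
        if PySem.Set.contains ((pvTC selected).2) (PySem.Str.slice o none (some i)) then
          PySem.Set.add d (PySem.Str.slice o none (some i))
        else d) d) PySem.Set.empty

-- categories that contain a non-unspecified code
def pvGoodCats (selected : List (List (String × String))) : PySem.Set String :=
  ((pvTC selected).2).foldl (fun g c =>
      if !pvUnspecB (((pvTC selected).1).getD c "") then PySem.Set.add g (pvCategory c) else g)
    PySem.Set.empty

def pvDropB (selected : List (List (String × String))) : PySem.Set String :=
  ((pvTC selected).2).foldl (fun d c =>
      if pvUnspecB (((pvTC selected).1).getD c "") &&
          PySem.Set.contains (pvGoodCats selected) (pvCategory c) then PySem.Set.add d c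
      else d) (pvDropB1 selected)

def drop_ancestors_and_unspecified_py_alt (selected : List (List (String × String))) : List (List (String × String)) :=
  selected.filter (fun s => !(PySem.Set.contains (pvDropB selected) (pvCode s)))

-- ===== PRECONDITION & SPEC =====
def Spec_drop_ancestors_and_unspecified_py (selected : List (List (String × String))) (out : List (List (String × String))) : Prop := out = drop_ancestors_and_unspecified_py_alt selected
instance (selected : List (List (String × String))) (out : List (List (String × String))) : Decidable (Spec_drop_ancestors_and_unspecified_py selected out) := by unfold Spec_drop_ancestors_and_unspecified_py; infer_instance

-- ===== CLAIM (what is proved, stated in full; the proofs are below) =====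
def Claim_equal_drop_ancestors_and_unspecified_py : Prop := ∀ (selected : List (List (String × String))), Dom_drop_ancestors_and_unspecified_py selected → Spec_drop_ancestors_and_unspecified_py selected (drop_ancestors_and_unspecified_py selected)

-- ===== LEMMAS AND PROOFS =====

-- generic: membership in a fold whose step is characterised pointwise
theorem pv_mem_foldl_of_step {α β : Type} (x : α) (l : List β) (g : List α → β → List α)
    (P : β → Prop) (h : ∀ d c, x ∈ g d c ↔ x ∈ d ∨ P c) (d0 : List α) :
    x ∈ l.foldl g d0 ↔ x ∈ d0 ∨ ∃ c ∈ l, P c := by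
  induction l generalizing d0 with
  | nil => simp
  | cons a t ih =>
    simp only [List.foldl_cons, ih, h d0 a, List.mem_cons]
    constructor
    · rintro ((h1 | h2) | ⟨c, hc, hp⟩)
      · exact Or.inl h1
      · exact Or.inr ⟨a, Or.inl rfl, h2⟩
      · exact Or.inr ⟨c, Or.inr hc, hp⟩
    · rintro (h1 | ⟨c, (rfl | hc), hp⟩)
      · exact Or.inl (Or.inl h1)
      · exact Or.inl (Or.inr hp)
      · exact Or.inr ⟨c, hc, hp⟩

-- the two unspecified-title tests agree ("unspecified" contains "unspec")
theorem pv_unspec_eq (t : String) : pvUnspecA t = pvUnspecB t := by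
  unfold pvUnspecA pvUnspecB
  rcases hb : PySem.Str.isIn "unspec" (PySem.Str.lower t) with _ | _
  · rcases ha : PySem.Str.isIn "unspecified" (PySem.Str.lower t) with _ | _
    · simp
    · exfalso
      rw [PySem.Str.isIn_eq, PySem.Chars.isIn_iff_infix] at ha
      rw [PySem.Str.isIn_eq, PySem.Chars.isIn_eq_false_iff] at hb
      exact hb (List.IsInfix.trans (List.IsPrefix.isInfix (by decide)) ha)
  · simp

-- membership in the ordered code set B builds = membership in A's code list
theorem pv_mem_codesetB (selected : List (List (String × String))) (x : String) :
    x ∈ selected.foldl (fun cs s => if pvTruthyCode s then PySem.Set.add cs (pvCode s) else cs)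
        PySem.Set.empty
      ↔ x ∈ pvCodesA selected := by
  rw [pv_mem_foldl_of_step x selected _ (fun s => pvTruthyCode s = true ∧ x = pvCode s)]
  · unfold pvCodesA
    simp only [List.mem_map, List.mem_filter, PySem.Set.empty, List.not_mem_nil, false_or]
    constructor
    · rintro ⟨s, hs, ht, rfl⟩; exact ⟨s, ⟨hs, ht⟩, rfl⟩
    · rintro ⟨s, ⟨hs, ht⟩, rfl⟩; exact ⟨s, hs, ht, rfl⟩
  · intro d c
    split_ifs with h
    · simp [PySem.Set.mem_add, h]
    · simp [h]

-- B's paired fold splits into its two components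
theorem pv_pair_fold (selected : List (List (String × String))) :
    pvTC selected
    = (pvTitles selected,
       selected.foldl (fun cs s => if pvTruthyCode s then PySem.Set.add cs (pvCode s) else cs)
         PySem.Set.empty) := by
  unfold pvTC pvTitles
  exact PySem.List.foldl_prod_mk
    (fun (d : PySem.Dict String String) s => d.insert (pvCode s) (pvGetD s "title" ""))
    (fun (cs : PySem.Set String) s => if pvTruthyCode s then PySem.Set.add cs (pvCode s) else cs)
    selected PySem.Dict.empty PySem.Set.empty

-- A's ancestor condition producing x ⇔ B's prefix enumeration producing x
theorem pv_prefix_equiv (codes : List String) (x : String) :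
    (∃ c ∈ codes, (∃ o ∈ codes, ¬(o = c) ∧ (PySem.Str.startswith o c &&
        decide (PySem.Str.len c < PySem.Str.len o)) = true) ∧ x = c)
    ↔ (∃ o ∈ codes, ∃ i ∈ PySem.List.pyRange 0 (PySem.Str.len o) 1,
        (PySem.Str.slice o none (some i) ∈ codes ∧ x = PySem.Str.slice o none (some i))) := by
  constructor
  · rintro ⟨c, hc, ⟨o, ho, hne, hcond⟩, hx⟩
    subst hx
    rw [Bool.and_eq_true, decide_eq_true_iff, PySem.Str.startswith_eq,
      PySem.Chars.startswith_iff] at hcond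
    obtain ⟨hpre, hlen⟩ := hcond
    rw [PySem.Str.len_eq, PySem.Str.len_eq] at hlen
    have hslice : PySem.Str.slice o none (some ((x.toList.length : Nat) : Int)) = x := by
      rw [← String.toList_inj, PySem.Str.toList_slice, PySem.Chars.slice_eq_listSlice,
        PySem.List.slice_to_natCast]
      exact (List.prefix_iff_eq_take.mp hpre).symm
    refine ⟨o, ho, ((x.toList.length : Nat) : Int), ?_, ?_, ?_⟩
    · rw [PySem.List.mem_pyRange_iff_of_pos (by norm_num), PySem.Str.len_eq]
      exact ⟨by positivity, hlen, one_dvd _⟩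
    · rw [hslice]; exact hc
    · exact hslice.symm
  · rintro ⟨o, ho, i, hi, hmem, hx⟩
    subst hx
    rw [PySem.List.mem_pyRange_iff_of_pos (by norm_num)] at hi
    obtain ⟨hi0, hilt, -⟩ := hi
    obtain ⟨n, rfl⟩ : ∃ n : Nat, i = (n : Int) := ⟨i.toNat, by omega⟩
    have hpl : (PySem.Str.slice o none (some (n : Int))).toList = o.toList.take n := by
      rw [PySem.Str.toList_slice, PySem.Chars.slice_eq_listSlice, PySem.List.slice_to_natCast]
    rw [PySem.Str.len_eq] at hilt
    have hn : n < o.toList.length := by exact_mod_cast hilt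
    have hlen : (PySem.Str.slice o none (some (n : Int))).toList.length < o.toList.length := by
      rw [hpl, List.length_take]; omega
    refine ⟨PySem.Str.slice o none (some (n : Int)), hmem, ⟨o, ho, ?_, ?_⟩, rfl⟩
    · intro h
      have := congrArg List.length (congrArg String.toList h)
      omega
    · rw [Bool.and_eq_true, decide_eq_true_iff, PySem.Str.startswith_eq,
        PySem.Chars.startswith_iff, PySem.Str.len_eq, PySem.Str.len_eq]
      exact ⟨hpl ▸ List.take_prefix _ _, by exact_mod_cast hlen⟩

-- A's "more specific exists" scan ⇔ B's good-category condition, for an unspecified x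
theorem pv_unspec_equiv (codes : List String) (titles : PySem.Dict String String) (x : String) :
    (∃ c ∈ codes, pvUnspecA (titles.getD c "") = true ∧
        (codes.any (fun o => o != c && (pvCategory o == pvCategory c) &&
          !pvUnspecA (titles.getD o ""))) = true ∧ x = c)
    ↔ (∃ c ∈ codes, pvUnspecB (titles.getD c "") = true ∧
        (∃ o ∈ codes, ¬pvUnspecB (titles.getD o "") = true ∧
          pvCategory c = pvCategory o) ∧ x = c) := by
  constructor
  · rintro ⟨c, hc, hu, hany, hx⟩
    subst hx
    rw [List.any_eq_true] at hany
    obtain ⟨o, ho, hcond⟩ := hany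
    simp only [Bool.and_eq_true, bne_iff_ne, beq_iff_eq, Bool.not_eq_eq_eq_not,
      Bool.not_true] at hcond
    refine ⟨x, hc, (pv_unspec_eq _) ▸ hu, ⟨o, ho, ?_, (hcond.1.2).symm⟩, rfl⟩
    rw [← pv_unspec_eq]; simp [hcond.2]
  · rintro ⟨c, hc, hu, ⟨o, ho, hno, hcat⟩, hx⟩
    subst hx
    rw [← pv_unspec_eq] at hu hno
    refine ⟨x, hc, hu, ?_, rfl⟩
    rw [List.any_eq_true]
    refine ⟨o, ho, ?_⟩
    have hne : o ≠ x := by intro h; rw [h] at hno; exact hno hu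
    simp only [Bool.and_eq_true, bne_iff_ne, beq_iff_eq, Bool.not_eq_eq_eq_not, Bool.not_true]
    refine ⟨⟨hne, hcat.symm⟩, ?_⟩
    cases h : pvUnspecA (titles.getD o "") with
    | false => rfl
    | true => exact absurd h hno

-- good-category membership
theorem pv_mem_goodcats (codes : List String) (titles : PySem.Dict String String) (g : String) :
    g ∈ codes.foldl (fun gs c =>
        if !pvUnspecB (titles.getD c "") then PySem.Set.add gs (pvCategory c) else gs)
        PySem.Set.empty
      ↔ ∃ c ∈ codes, ¬pvUnspecB (titles.getD c "") = true ∧ g = pvCategory c := by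
  rw [pv_mem_foldl_of_step g codes _
    (fun c => ¬pvUnspecB (titles.getD c "") = true ∧ g = pvCategory c)]
  · simp [PySem.Set.empty]
  · intro d c
    split_ifs with h
    · simp only [Bool.not_eq_eq_eq_not, Bool.not_true] at h
      simp [PySem.Set.mem_add, h]
    · simp only [Bool.not_eq_eq_eq_not, Bool.not_true, Bool.not_eq_false] at h
      simp [h]

-- membership in A's drop set after both loops
theorem pv_mem_dropA (selected : List (List (String × String))) (x : String) :
    x ∈ pvDropA selected
      ↔ ((∃ c ∈ pvCodesA selected, (∃ o ∈ pvCodesA selected, ¬(o = c) ∧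
            (PySem.Str.startswith o c && decide (PySem.Str.len c < PySem.Str.len o)) = true) ∧ x = c)
        ∨ (∃ c ∈ pvCodesA selected, pvUnspecA ((pvTitles selected).getD c "") = true ∧
            ((pvCodesA selected).any (fun o => o != c && (pvCategory o == pvCategory c) &&
              !pvUnspecA ((pvTitles selected).getD o ""))) = true ∧ x = c)) := by
  unfold pvDropA pvDropA1
  rw [pv_mem_foldl_of_step x (pvCodesA selected) _
    (fun c => pvUnspecA ((pvTitles selected).getD c "") = true ∧
      ((pvCodesA selected).any (fun o => o != c && (pvCategory o == pvCategory c) &&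
        !pvUnspecA ((pvTitles selected).getD o ""))) = true ∧ x = c)]
  · rw [pv_mem_foldl_of_step x (pvCodesA selected) _
      (fun c => (∃ o ∈ pvCodesA selected, ¬(o = c) ∧ (PySem.Str.startswith o c &&
        decide (PySem.Str.len c < PySem.Str.len o)) = true) ∧ x = c)]
    · simp only [PySem.Set.empty, List.not_mem_nil, false_or]
    · intro d c
      rw [pv_mem_foldl_of_step x (pvCodesA selected) _
        (fun o => ¬(o = c) ∧ (PySem.Str.startswith o c &&
          decide (PySem.Str.len c < PySem.Str.len o)) = true ∧ x = c)]
      · constructor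
        · rintro (h1 | ⟨o, ho, hne, hc, rfl⟩)
          · exact Or.inl h1
          · exact Or.inr ⟨⟨o, ho, hne, hc⟩, rfl⟩
        · rintro (h1 | ⟨⟨o, ho, hne, hc⟩, rfl⟩)
          · exact Or.inl h1
          · exact Or.inr ⟨o, ho, hne, hc, rfl⟩
      · intro d o
        split_ifs with h1 h2
        · simp [h1]
        · rw [PySem.Set.mem_add]
          constructor
          · rintro (hd | rfl)
            · exact Or.inl hd
            · exact Or.inr ⟨h1, h2, rfl⟩
          · rintro (hd | ⟨-, -, rfl⟩)
            · exact Or.inl hd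
            · exact Or.inr rfl
        · constructor
          · exact Or.inl
          · rintro (hd | ⟨-, hcond, -⟩)
            · exact hd
            · exact absurd hcond h2
  · intro d c
    split_ifs with h1 h2
    · rw [PySem.Set.mem_add]
      constructor
      · rintro (hd | rfl)
        · exact Or.inl hd
        · exact Or.inr ⟨h1, h2, rfl⟩
      · rintro (hd | ⟨-, -, rfl⟩)
        · exact Or.inl hd
        · exact Or.inr rfl
    · constructor
      · exact Or.inl
      · rintro (hd | ⟨-, hany, -⟩)
        · exact hd
        · exact absurd hany h2
    · constructor
      · exact Or.inl
      · rintro (hd | ⟨hu, -, -⟩)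
        · exact hd
        · exact absurd hu h1

-- membership in B's drop set after both loops
theorem pv_mem_dropB (selected : List (List (String × String))) (x : String) :
    x ∈ pvDropB selected
      ↔ ((∃ o ∈ (pvTC selected).2, ∃ i ∈ PySem.List.pyRange 0 (PySem.Str.len o) 1,
            (PySem.Str.slice o none (some i) ∈ (pvTC selected).2 ∧
              x = PySem.Str.slice o none (some i)))
        ∨ (∃ c ∈ (pvTC selected).2, pvUnspecB (((pvTC selected).1).getD c "") = true ∧
            (∃ o ∈ (pvTC selected).2, ¬pvUnspecB (((pvTC selected).1).getD o "") = true ∧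
              pvCategory c = pvCategory o) ∧ x = c)) := by
  unfold pvDropB pvDropB1
  rw [pv_mem_foldl_of_step x ((pvTC selected).2) _
    (fun c => pvUnspecB (((pvTC selected).1).getD c "") = true ∧
      (∃ o ∈ (pvTC selected).2, ¬pvUnspecB (((pvTC selected).1).getD o "") = true ∧
        pvCategory c = pvCategory o) ∧ x = c)]
  · rw [pv_mem_foldl_of_step x ((pvTC selected).2) _
      (fun o => ∃ i ∈ PySem.List.pyRange 0 (PySem.Str.len o) 1,
        (PySem.Str.slice o none (some i) ∈ (pvTC selected).2 ∧
          x = PySem.Str.slice o none (some i)))]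
    · simp only [PySem.Set.empty, List.not_mem_nil, false_or]
    · intro d o
      rw [pv_mem_foldl_of_step x (PySem.List.pyRange 0 (PySem.Str.len o) 1) _
        (fun i => PySem.Str.slice o none (some i) ∈ (pvTC selected).2 ∧
          x = PySem.Str.slice o none (some i))]
      intro d i
      split_ifs with h
      · rw [PySem.Set.contains_iff] at h
        simp [PySem.Set.mem_add, h]
      · have h' : PySem.Str.slice o none (some i) ∉ (pvTC selected).2 :=
          fun hm => h ((PySem.Set.contains_iff _ _).mpr hm)
        simp [h']
  · intro d c
    unfold pvGoodCats
    split_ifs with h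
    · rw [Bool.and_eq_true, PySem.Set.contains_iff, pv_mem_goodcats] at h
      obtain ⟨h1, o, ho, hno, hcat⟩ := h
      simp only [PySem.Set.mem_add]
      constructor
      · rintro (hd | rfl)
        · exact Or.inl hd
        · exact Or.inr ⟨h1, ⟨o, ho, hno, hcat⟩, rfl⟩
      · rintro (hd | ⟨-, -, rfl⟩)
        · exact Or.inl hd
        · exact Or.inr rfl
    · constructor
      · exact Or.inl
      · rintro (hd | ⟨h1, ⟨o, ho, hno, hcat⟩, rfl⟩)
        · exact hd
        · exfalso
          apply h
          rw [Bool.and_eq_true, PySem.Set.contains_iff, pv_mem_goodcats]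
          exact ⟨h1, o, ho, hno, hcat⟩

-- ===== VERDICT (by name: the statement is the Claim_ definition above) =====
theorem drop_ancestors_and_unspecified_py_spec : Claim_equal_drop_ancestors_and_unspecified_py := by
  intro selected _
  unfold Spec_drop_ancestors_and_unspecified_py
  unfold drop_ancestors_and_unspecified_py drop_ancestors_and_unspecified_py_alt
  by_cases hsel : selected = []
  · subst hsel; rfl
  · rw [if_neg hsel]
    apply List.filter_congr
    intro s _
    show (!PySem.Set.contains (pvDropA selected) (pvCode s))
        = (!PySem.Set.contains (pvDropB selected) (pvCode s))
    have h : PySem.Set.contains (pvDropA selected) (pvCode s)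
        = PySem.Set.contains (pvDropB selected) (pvCode s) := by
      rw [Bool.eq_iff_iff, PySem.Set.contains_iff, PySem.Set.contains_iff,
        pv_mem_dropA, pv_mem_dropB]
      simp only [pv_pair_fold, pv_mem_codesetB]
      rw [pv_prefix_equiv (pvCodesA selected) (pvCode s),
        pv_unspec_equiv (pvCodesA selected) (pvTitles selected) (pvCode s)]
    rw [h]
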